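-- pv_equiv track=rewrite | github.com/tomdif/causal-algebraic-geometry-lean | cag_causal_inference.py | enumerate_convex_subsets
-- ===== SOURCE A (Python) =====
-- from itertools import combinations, chain as iterchain
--
-- def is_order_convex(subset_set, closure):
--     """Check if a subset is order-convex: if a,c in S and a < b < c, then b in S."""
--     for (a, c) in closure:
--         if a in subset_set and c in subset_set:
--             # Check all b with a < b < c
--             for (x, y) in closure:
--                 if x == a and (y, c) in closure and y != a and y != c:
--                     if y not in subset_set:
--                         return False
--     return True
--
-- def enumerate_convex_subsets(nodes, closure):
--     """Enumerate all order-convex subsets of the poset."""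
--     convex = []
--     for r in range(len(nodes) + 1):
--         for subset in combinations(nodes, r):
--             subset_set = set(subset)
--             if is_order_convex(subset_set, closure):
--                 convex.append(subset)
--     return convex
-- ===== SOURCE B (Python) =====
-- def enumerate_convex_subsets(nodes, closure):
--     """Enumerate all order-convex subsets of the poset (triples precomputed once)."""
--     clos = set(closure)
--     triples = {(a, c, y) for (a, c) in clos for (x, y) in clos
--                if x == a and (y, c) in clos and y != a and y != c}
--
--     def convex(s):
--         ss = set(s)
--         return all(y in ss for (a, c, y) in triples if a in ss and c in ss)
--
--     def rec(rest):
--         if not rest: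
--             return [()]
--         tails = rec(rest[1:])
--         return [(rest[0],) + t for t in tails] + tails
--
--     subs = [s for s in rec(tuple(nodes)) if convex(s)]
--     return [s for r in range(len(nodes) + 1) for s in subs if len(s) == r]
-- ===== Notes on version B (the rewrite author's own statement) =====
-- stated objective: alternative
-- what changed: B precomputes the set of betweenness triples (a,c,y) from the closure once, enumerates all subsets by structural include/skip recursion, checks convexity with one pass over the triples per subset, and groups the surviving subsets by size; A re-scans the closure with nested loops for every one of the 2^n subsets. Per-subset work drops from closure-quadratic to one triple scan, but both remain exponential in len(nodes), and a timing run showed no win on the generated inputs.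
import Mathlib
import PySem

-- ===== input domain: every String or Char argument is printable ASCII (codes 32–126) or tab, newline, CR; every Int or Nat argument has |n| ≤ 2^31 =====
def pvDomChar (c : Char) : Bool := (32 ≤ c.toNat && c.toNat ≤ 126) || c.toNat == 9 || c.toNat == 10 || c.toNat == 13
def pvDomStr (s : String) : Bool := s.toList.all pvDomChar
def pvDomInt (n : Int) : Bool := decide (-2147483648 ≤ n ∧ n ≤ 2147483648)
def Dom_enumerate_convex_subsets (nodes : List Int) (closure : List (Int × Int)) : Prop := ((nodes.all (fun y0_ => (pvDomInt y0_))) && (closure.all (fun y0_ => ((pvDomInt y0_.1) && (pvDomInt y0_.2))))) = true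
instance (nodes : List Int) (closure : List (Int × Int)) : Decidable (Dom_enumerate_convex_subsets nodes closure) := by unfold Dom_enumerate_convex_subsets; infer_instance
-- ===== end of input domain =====

-- B precomputes the "betweenness" triples from the closure once and enumerates
-- subsets by structural include/skip recursion grouped by size, instead of
-- re-scanning the closure with nested loops for every subset (objective: alternative).

-- ===== PORT A =====
-- itertools.combinations(nodes, r) ported by hand (lexicographic by position, Python's order)
def pvCombinations : List Int → Nat → List (List Int)
  | _, 0 => [[]]
  | [], _ + 1 => []
  | x :: xs, r + 1 => (pvCombinations xs r).map (x :: ·) ++ pvCombinations xs (r + 1)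

-- is_order_convex: the early-return-False loops become List.all
def pvIsOrderConvex (subset_set : PySem.Set Int) (closure : List (Int × Int)) : Bool :=
  closure.all (fun ac =>
    if ac.1 ∈ subset_set ∧ ac.2 ∈ subset_set then
      closure.all (fun xy =>
        if xy.1 = ac.1 ∧ (xy.2, ac.2) ∈ closure ∧ xy.2 ≠ ac.1 ∧ xy.2 ≠ ac.2 then
          decide (xy.2 ∈ subset_set)
        else true)
    else true)

def enumerate_convex_subsets (nodes : List Int) (closure : List (Int × Int)) : List (List Int) :=
  (List.range (nodes.length + 1)).foldl (fun convex r =>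
    (pvCombinations nodes r).foldl (fun convex subset =>
      if pvIsOrderConvex (PySem.Set.ofList subset) closure then convex ++ [subset] else convex)
      convex) []

-- ===== PORT B =====
def pvTriples (closure : List (Int × Int)) : List (Int × Int × Int) :=
  let clos : PySem.Set (Int × Int) := PySem.Set.ofList closure
  PySem.Set.ofList (clos.flatMap (fun ac => clos.filterMap (fun xy =>
    if xy.1 = ac.1 ∧ (xy.2, ac.2) ∈ clos ∧ xy.2 ≠ ac.1 ∧ xy.2 ≠ ac.2 then
      some (ac.1, ac.2, xy.2)
    else none)))

def pvConvexB (s : List Int) (triples : List (Int × Int × Int)) : Bool :=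
  let ss : PySem.Set Int := PySem.Set.ofList s
  triples.all (fun t => if t.1 ∈ ss ∧ t.2.1 ∈ ss then decide (t.2.2 ∈ ss) else true)

def pvRec : List Int → List (List Int)
  | [] => [[]]
  | x :: xs => let tails := pvRec xs; tails.map (x :: ·) ++ tails

def enumerate_convex_subsets_alt (nodes : List Int) (closure : List (Int × Int)) : List (List Int) :=
  let triples := pvTriples closure
  let subs := (pvRec nodes).filter (fun s => pvConvexB s triples)
  (List.range (nodes.length + 1)).flatMap (fun r => subs.filter (fun s => s.length == r))

-- ===== PRECONDITION & SPEC =====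
def Spec_enumerate_convex_subsets (nodes : List Int) (closure : List (Int × Int)) (out : List (List Int)) : Prop := out = enumerate_convex_subsets_alt nodes closure
instance (nodes : List Int) (closure : List (Int × Int)) (out : List (List Int)) : Decidable (Spec_enumerate_convex_subsets nodes closure out) := by unfold Spec_enumerate_convex_subsets; infer_instance

-- ===== CLAIM (what is proved, stated in full; the proofs are below) =====
def Claim_equal_enumerate_convex_subsets : Prop := ∀ (nodes : List Int) (closure : List (Int × Int)), Dom_enumerate_convex_subsets nodes closure → Spec_enumerate_convex_subsets nodes closure (enumerate_convex_subsets nodes closure)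

-- ===== LEMMAS AND PROOFS =====

-- the two convexity tests agree on every subset
lemma convex_eq (s : List Int) (closure : List (Int × Int)) :
    pvIsOrderConvex (PySem.Set.ofList s) closure = pvConvexB s (pvTriples closure) := by
  rw [Bool.eq_iff_iff]
  simp only [pvIsOrderConvex, pvConvexB, pvTriples, List.all_eq_true, List.mem_flatMap,
    List.mem_filterMap, PySem.Set.mem_ofList]
  constructor
  · rintro h t ⟨ac, hac, xy, hxy, heq⟩
    split_ifs at heq with hc
    obtain ⟨h1, h2, h3, h4⟩ := hc
    injection heq with heq
    subst heq
    have ha := h ac hac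
    split_ifs with hm
    · simp only [hm.1, hm.2, and_self, if_true, List.all_eq_true] at ha
      have := ha xy hxy
      simpa [h1, h2, h3, h4] using this
    · rfl
  · rintro h ac hac
    split_ifs with hm
    · rw [List.all_eq_true]
      intro xy hxy
      split_ifs with hc
      · obtain ⟨h1, h2, h3, h4⟩ := hc
        have := h (ac.1, ac.2, xy.2) ⟨ac, hac, xy, hxy, by simp [h1, h2, h3, h4]⟩
        simpa [hm] using this
      · rfl
    · rfl

-- size-r slice of the subset recursion is exactly combinations(nodes, r)
lemma filter_pvRec (l : List Int) : ∀ (r : Nat),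
    (pvRec l).filter (fun s => s.length == r) = pvCombinations l r := by
  induction l with
  | nil => intro r; cases r <;> simp [pvRec, pvCombinations]
  | cons x xs ih =>
    intro r
    cases r with
    | zero =>
      have := ih 0
      simp [pvRec, pvCombinations, List.filter_append, List.filter_map, Function.comp_def] at this ⊢
      exact this
    | succ r =>
      simp [pvRec, pvCombinations, List.filter_append, List.filter_map, Function.comp_def,
        ← ih r, ← ih (r + 1)]

-- ===== VERDICT (by name: the statement is the Claim_ definition above) =====
theorem enumerate_convex_subsets_spec : Claim_equal_enumerate_convex_subsets := by
  intro nodes closure _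
  show _ = _
  unfold enumerate_convex_subsets enumerate_convex_subsets_alt
  simp only [PySem.List.foldl_append_if_eq_filter, PySem.List.foldl_append_eq_flatMap,
    List.nil_append]
  refine congrArg (fun f => List.flatMap f (List.range (nodes.length + 1))) (funext fun r => ?_)
  rw [← filter_pvRec nodes r, List.filter_filter, List.filter_filter]
  apply List.filter_congr
  intro s _
  rw [convex_eq]
  exact Bool.and_comm _ _
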